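-- pv_equiv track=rewrite | github.com/mohamedgabr96/gender_rewriting_WANLP | full_pipeline/main.py | search_with_prefix
-- ===== SOURCE A (Python) =====
-- def search_with_prefix(word, sentence):
--     K = 3
--     k_len_subs = [word[i: j] for i in range(len(word)) for j in range(i + 1, len(word) + 1) if len(word[i:j]) == K]
--     l = sentence.split(" ")
--     result1 = []
--     result2 = []
--     for k_len_sub in k_len_subs:
--         result1 += list(filter(lambda x: x.startswith(k_len_sub), l))
--
--         result2 += list(filter(lambda x: k_len_sub in x, l))
--
--     return result1, result2
-- ===== SOURCE B (Python) =====
-- def search_with_prefix(word, sentence):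
--     K = 3
--     l = sentence.split(" ")
--     pref = {}
--     cont = {}
--     for x in l:
--         pref.setdefault(x[:K], []).append(x)
--         for g in dict.fromkeys(x[i: i + K] for i in range(len(x) - K + 1)):
--             cont.setdefault(g, []).append(x)
--     result1 = []
--     result2 = []
--     for i in range(len(word) - K + 1):
--         g = word[i: i + K]
--         result1 += pref.get(g, [])
--         result2 += cont.get(g, [])
--     return result1, result2
-- ===== Notes on version B (the rewrite author's own statement) =====
-- stated objective: faster
-- what changed: Instead of rescanning the whole word list twice for every 3-gram of `word`, B builds two dictionaries in one pass over the words (first-3-characters -> words, distinct 3-gram -> containing words) and answers each 3-gram of `word` by a lookup.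
import Mathlib
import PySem

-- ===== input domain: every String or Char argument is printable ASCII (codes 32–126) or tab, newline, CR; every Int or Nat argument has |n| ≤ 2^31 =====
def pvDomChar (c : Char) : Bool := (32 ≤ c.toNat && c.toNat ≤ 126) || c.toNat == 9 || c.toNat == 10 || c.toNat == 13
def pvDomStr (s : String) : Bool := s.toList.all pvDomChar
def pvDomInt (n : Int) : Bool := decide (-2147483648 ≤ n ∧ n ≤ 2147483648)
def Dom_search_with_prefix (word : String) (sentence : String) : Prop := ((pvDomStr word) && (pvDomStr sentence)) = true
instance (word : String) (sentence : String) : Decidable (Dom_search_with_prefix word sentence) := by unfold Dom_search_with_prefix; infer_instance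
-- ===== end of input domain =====

-- B replaces A's per-3-gram rescans of the word list by two dictionaries (first-3-chars → words,
-- 3-gram → containing words) built in one pass over the words, then one lookup per 3-gram of `word`.

-- ===== PORT A =====
-- sentence.split(" "): the separator " " is nonempty, so PySem.Str.split? is always `some`; exact
def pySplitSpace (s : String) : List String := (PySem.Str.split? s " ").getD []

def search_with_prefix (word : String) (sentence : String) : List String × List String :=
  let K : Int := 3
  let k_len_subs : List String :=
    (PySem.List.pyRange 0 (PySem.Str.len word)).flatMap (fun i =>
      ((PySem.List.pyRange (i + 1) (PySem.Str.len word + 1)).filter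
          (fun j => PySem.Str.len (PySem.Str.slice word (some i) (some j)) == K)).map
        (fun j => PySem.Str.slice word (some i) (some j)))
  let l := pySplitSpace sentence
  k_len_subs.foldl (fun r k_len_sub =>
      (r.1 ++ l.filter (fun x => PySem.Str.startswith x k_len_sub),
       r.2 ++ l.filter (fun x => PySem.Str.isIn k_len_sub x))) ([], [])

-- ===== PORT B =====
-- dict.fromkeys(x[i:i+K] for i in range(len(x)-K+1)): the distinct 3-grams of x in first-occurrence order
def gramsOf (x : String) : List String :=
  PySem.List.dedup ((PySem.List.pyRange 0 (PySem.Str.len x - 2)).map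
    (fun i => PySem.Str.slice x (some i) (some (i + 3))))

def search_with_prefix_alt (word : String) (sentence : String) : List String × List String :=
  let l := pySplitSpace sentence
  let d := l.foldl (fun (d : PySem.Dict String (List String) × PySem.Dict String (List String)) x =>
      (d.1.modify (PySem.Str.slice x none (some 3)) [] (· ++ [x]),
       (gramsOf x).foldl (fun d2 g => d2.modify g [] (· ++ [x])) d.2))
    (PySem.Dict.empty, PySem.Dict.empty)
  (PySem.List.pyRange 0 (PySem.Str.len word - 2)).foldl (fun r i =>
      (r.1 ++ d.1.getD (PySem.Str.slice word (some i) (some (i + 3))) [],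
       r.2 ++ d.2.getD (PySem.Str.slice word (some i) (some (i + 3))) []))
    ([], [])

-- ===== PRECONDITION & SPEC =====
def Spec_search_with_prefix (word : String) (sentence : String) (out : List String × List String) : Prop := out = search_with_prefix_alt word sentence
instance (word : String) (sentence : String) (out : List String × List String) : Decidable (Spec_search_with_prefix word sentence out) := by unfold Spec_search_with_prefix; infer_instance

-- ===== CLAIM (what is proved, stated in full; the proofs are below) =====
def Claim_equal_search_with_prefix : Prop := ∀ (word : String) (sentence : String), Dom_search_with_prefix word sentence → Spec_search_with_prefix word sentence (search_with_prefix word sentence)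

-- ===== LEMMAS AND PROOFS =====

-- the window x[k:k+3], on the character-list side
theorem window_toList (x : String) (k : Nat) :
    (PySem.Str.slice x (some (k : Int)) (some ((k : Int) + 3))).toList = (x.toList.drop k).take 3 := by
  rw [PySem.Str.toList_slice, PySem.Chars.slice_eq_listSlice,
      show ((k : Int) + 3) = ((k + 3 : Nat) : Int) by push_cast; ring,
      PySem.List.slice_natCast]
  congr 1
  omega

-- every window B looks up has exactly 3 characters
theorem window_len (word : String) (i : Int) (h0 : 0 ≤ i) (h : i < PySem.Str.len word - 2) :
    (PySem.Str.slice word (some i) (some (i + 3))).toList.length = 3 := by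
  obtain ⟨k, rfl⟩ := Int.eq_ofNat_of_zero_le h0
  rw [PySem.Str.len_eq] at h
  rw [window_toList, List.length_take, List.length_drop]
  omega

-- the first-3-characters key matches x exactly when x starts with g, for any 3-character g
theorem key_eq_iff (x g : String) (hg : g.toList.length = 3) :
    (PySem.Str.slice x none (some 3) == g) = PySem.Str.startswith x g := by
  rw [Bool.eq_iff_iff, beq_iff_eq, PySem.Str.startswith_eq, PySem.Chars.startswith_iff]
  have h3 : ((3 : Int)) = ((3 : Nat) : Int) := by norm_num
  constructor
  · intro h
    rw [← h, PySem.Str.toList_slice, PySem.Chars.slice_eq_listSlice, h3, PySem.List.slice_to_natCast]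
    exact List.take_prefix _ _
  · intro h
    have htake := List.prefix_iff_eq_take.mp h
    have hl : (PySem.Str.slice x none (some 3)).toList = g.toList := by
      rw [PySem.Str.toList_slice, PySem.Chars.slice_eq_listSlice, h3, PySem.List.slice_to_natCast, hg] at *
      exact htake.symm
    exact String.toList_inj.mp hl

-- membership in the distinct-3-gram list is substring containment, for any 3-character g
theorem mem_gramsOf_iff (x g : String) (hg : g.toList.length = 3) :
    (g ∈ gramsOf x) ↔ PySem.Str.isIn g x = true := by
  rw [gramsOf, PySem.List.mem_dedup, List.mem_map,
      PySem.Str.isIn_eq, ← PySem.Chars.exists_prefix_drop_iff_isIn]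
  constructor
  · rintro ⟨i, hi, rfl⟩
    rw [PySem.List.mem_pyRange_one] at hi
    obtain ⟨k, rfl⟩ := Int.eq_ofNat_of_zero_le hi.1
    refine ⟨k, ?_⟩
    rw [window_toList]
    have hlen : k + 3 ≤ x.toList.length := by
      have := hi.2; rw [PySem.Str.len_eq] at this; omega
    rw [List.prefix_iff_eq_take, List.length_take, List.length_drop]
    rw [show min 3 (x.toList.length - k) = 3 by omega]
  · rintro ⟨j, hj⟩
    have htake := List.prefix_iff_eq_take.mp hj
    have hlenle : g.toList.length ≤ (x.toList.drop j).length := hj.length_le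
    rw [List.length_drop, hg] at hlenle
    refine ⟨(j : Int), ?_, ?_⟩
    · rw [PySem.List.mem_pyRange_one, PySem.Str.len_eq]
      constructor
      · positivity
      · omega
    · apply String.toList_inj.mp
      rw [window_toList]; rw [hg] at htake; exact htake.symm

-- the prefix dictionary's entry at a 3-character g is the filter A computes for g
theorem pref_getD (l : List String) (g : String) (hg : g.toList.length = 3) :
    (l.foldl (fun d x => d.modify (PySem.Str.slice x none (some 3)) [] (· ++ [x]))
        (PySem.Dict.empty : PySem.Dict String (List String))).getD g []
      = l.filter (fun x => PySem.Str.startswith x g) := by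
  have h := PySem.Dict.getD_foldl_modify_append
      (l.map (fun x => (PySem.Str.slice x none (some 3), x)))
      (PySem.Dict.empty : PySem.Dict String (List String)) g
  rw [List.foldl_map] at h
  simp only [PySem.Dict.getD_empty, List.nil_append, List.filter_map, List.map_map] at h
  rw [h]
  have hc : ∀ x : String,
      ((fun p : String × String => p.1 == g) ∘ fun x => (PySem.Str.slice x none (some 3), x)) x
        = PySem.Str.startswith x g := by
    intro x; simp [Function.comp, key_eq_iff x g hg]
  rw [List.filter_congr (fun x _ => hc x)]
  simp [Function.comp_def]

theorem flatMap_ite_singleton {α : Type} (l : List α) (p : α → Bool) :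
    (l.flatMap (fun x => if p x then [x] else [])) = l.filter p := by
  induction l with
  | nil => rfl
  | cons a t ih => simp only [List.flatMap_cons, List.filter_cons, ih]; split <;> simp

-- the containment dictionary's entry at a 3-character g is the filter A computes for g
theorem cont_getD (l : List String) (g : String) (hg : g.toList.length = 3) :
    (l.foldl (fun d x => (gramsOf x).foldl (fun d2 g' => d2.modify g' [] (· ++ [x])) d)
        (PySem.Dict.empty : PySem.Dict String (List String))).getD g []
      = l.filter (fun x => PySem.Str.isIn g x) := by
  have inner : ∀ (x : String) (d : PySem.Dict String (List String)),
      (gramsOf x).foldl (fun d2 g' => d2.modify g' [] (· ++ [x])) d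
        = ((gramsOf x).map (fun g' => (g', x))).foldl (fun d p => d.modify p.1 [] (· ++ [p.2])) d := by
    intro x d; rw [List.foldl_map]
  simp only [inner]
  rw [show (l.foldl (fun d x => ((gramsOf x).map (fun g' => (g', x))).foldl
        (fun d p => d.modify p.1 [] (· ++ [p.2])) d)
        (PySem.Dict.empty : PySem.Dict String (List String)))
      = ((l.map (fun x => (gramsOf x).map (fun g' => (g', x)))).flatten.foldl
        (fun d p => d.modify p.1 [] (· ++ [p.2]))
        (PySem.Dict.empty : PySem.Dict String (List String))) by
    rw [List.foldl_flatten, List.foldl_map]]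
  rw [← List.flatMap_def, PySem.Dict.getD_foldl_modify_append]
  simp only [PySem.Dict.getD_empty, List.nil_append]
  rw [List.filter_flatMap, List.map_flatMap]
  have per : ∀ x ∈ l,
      ((List.filter (fun p => p.1 == g) ((gramsOf x).map (fun g' => (g', x)))).map (fun p => p.2))
        = if PySem.Str.isIn g x then [x] else [] := by
    intro x _
    rw [List.filter_map, List.map_map]
    have hf : ((fun p : String × String => p.1 == g) ∘ fun g' => (g', x)) = (fun g' => g' == g) := rfl
    rw [hf, List.filter_beq]
    by_cases hmem : g ∈ gramsOf x
    · have hnd : (gramsOf x).Nodup := by rw [gramsOf]; exact PySem.List.nodup_dedup _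
      have hc : List.count g (gramsOf x) = 1 := List.count_eq_one_of_mem hnd hmem
      rw [hc, if_pos ((mem_gramsOf_iff x g hg).mp hmem)]
      simp
    · have hc : List.count g (gramsOf x) = 0 := List.count_eq_zero_of_not_mem hmem
      rw [hc, if_neg (by rw [← mem_gramsOf_iff x g hg]; exact hmem)]
      simp
  calc l.flatMap (fun x => ((List.filter (fun p => p.1 == g) ((gramsOf x).map (fun g' => (g', x)))).map (fun p => p.2)))
      = l.flatMap (fun x => if PySem.Str.isIn g x then [x] else []) := by
        rw [List.flatMap_def, List.flatMap_def, List.map_congr_left per]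
    _ = l.filter (fun x => PySem.Str.isIn g x) := flatMap_ite_singleton l _

-- A's double comprehension produces exactly the length-3 windows, left to right
theorem kLenSubs_eq (word : String) :
    (PySem.List.pyRange 0 (PySem.Str.len word)).flatMap (fun i =>
      ((PySem.List.pyRange (i + 1) (PySem.Str.len word + 1)).filter
          (fun j => PySem.Str.len (PySem.Str.slice word (some i) (some j)) == (3 : Int))).map
        (fun j => PySem.Str.slice word (some i) (some j)))
    = (PySem.List.pyRange 0 (PySem.Str.len word - 2)).map
        (fun i => PySem.Str.slice word (some i) (some (i + 3))) := by
  set n : Nat := word.toList.length with hn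
  have hlen : PySem.Str.len word = (n : Int) := PySem.Str.len_eq word
  have stepA : ∀ i ∈ PySem.List.pyRange 0 (PySem.Str.len word),
      ((PySem.List.pyRange (i + 1) (PySem.Str.len word + 1)).filter
          (fun j => PySem.Str.len (PySem.Str.slice word (some i) (some j)) == (3 : Int))).map
        (fun j => PySem.Str.slice word (some i) (some j))
      = if i + 3 ≤ (n : Int) then [PySem.Str.slice word (some i) (some (i + 3))] else [] := by
    intro i hi
    rw [PySem.List.mem_pyRange_one, hlen] at hi
    obtain ⟨a, rfl⟩ := Int.eq_ofNat_of_zero_le hi.1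
    have hcond : ∀ j ∈ PySem.List.pyRange ((a : Int) + 1) (PySem.Str.len word + 1),
        (PySem.Str.len (PySem.Str.slice word (some (a : Int)) (some j)) == (3 : Int))
          = (j == (a : Int) + 3) := by
      intro j hj
      rw [PySem.List.mem_pyRange_one, hlen] at hj
      obtain ⟨b, rfl⟩ := Int.eq_ofNat_of_zero_le (by omega : (0 : Int) ≤ j)
      have hab : a < b ∧ b ≤ n := by
        constructor <;> [exact_mod_cast hj.1; exact_mod_cast (by omega : ((b : Int)) ≤ (n : Int))]
      have hsl : (PySem.Str.slice word (some (a : Int)) (some (b : Int))).toList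
          = (word.toList.drop a).take (b - a) := by
        rw [PySem.Str.toList_slice, PySem.Chars.slice_eq_listSlice, PySem.List.slice_natCast]
      rw [Bool.eq_iff_iff, beq_iff_eq, beq_iff_eq, PySem.Str.len_eq, hsl,
          List.length_take, List.length_drop]
      constructor
      · intro h; have : min (b - a) (n - a) = 3 := by exact_mod_cast h
        have : b = a + 3 := by omega
        omega
      · intro h; have : b = a + 3 := by exact_mod_cast h
        have : min (b - a) (n - a) = 3 := by omega
        exact_mod_cast this
    rw [List.filter_congr hcond, List.filter_beq]
    by_cases hfit : (a : Int) + 3 ≤ (n : Int)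
    · have hmem : (a : Int) + 3 ∈ PySem.List.pyRange ((a : Int) + 1) (PySem.Str.len word + 1) := by
        rw [PySem.List.mem_pyRange_one, hlen]; omega
      rw [List.count_eq_one_of_mem (PySem.List.nodup_pyRange_one _ _) hmem, if_pos hfit]
      simp
    · have hmem : (a : Int) + 3 ∉ PySem.List.pyRange ((a : Int) + 1) (PySem.Str.len word + 1) := by
        rw [PySem.List.mem_pyRange_one, hlen]; omega
      rw [List.count_eq_zero_of_not_mem hmem, if_neg hfit]
      simp
  rw [List.flatMap_def, List.map_congr_left stepA, ← List.flatMap_def]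
  by_cases h3 : 3 ≤ n
  · rw [hlen, PySem.List.pyRange_one_append 0 ((n : Int) - 2) (n : Int) (by omega) (by omega),
        List.flatMap_append]
    have hfst : (PySem.List.pyRange 0 ((n : Int) - 2)).flatMap
        (fun i => if i + 3 ≤ (n : Int) then [PySem.Str.slice word (some i) (some (i + 3))] else [])
        = (PySem.List.pyRange 0 ((n : Int) - 2)).map
            (fun i => PySem.Str.slice word (some i) (some (i + 3))) := by
      have hcg : ∀ i ∈ PySem.List.pyRange 0 ((n : Int) - 2),
          (if i + 3 ≤ (n : Int) then [PySem.Str.slice word (some i) (some (i + 3))] else [])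
            = [PySem.Str.slice word (some i) (some (i + 3))] := by
        intro i hi
        rw [PySem.List.mem_pyRange_one] at hi
        rw [if_pos (by omega)]
      rw [List.flatMap_def, List.map_congr_left hcg, ← List.flatMap_def, ← List.map_eq_flatMap]
    have hsnd : (PySem.List.pyRange ((n : Int) - 2) (n : Int)).flatMap
        (fun i => if i + 3 ≤ (n : Int) then [PySem.Str.slice word (some i) (some (i + 3))] else [])
        = [] := by
      apply List.flatMap_eq_nil_iff.mpr
      intro i hi
      rw [PySem.List.mem_pyRange_one] at hi
      rw [if_neg (by omega)]
    rw [hfst, hsnd, List.append_nil]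
  · have hempty : PySem.List.pyRange 0 (PySem.Str.len word - 2) = [] := by
      rw [hlen]; exact PySem.List.pyRange_one_eq_nil (by omega)
    rw [hempty, List.map_nil]
    apply List.flatMap_eq_nil_iff.mpr
    intro i hi
    rw [hlen, PySem.List.mem_pyRange_one] at hi
    rw [if_neg (by omega)]

-- ===== VERDICT (by name: the statement is the Claim_ definition above) =====
theorem search_with_prefix_spec : Claim_equal_search_with_prefix := by
  intro word sentence _
  unfold Spec_search_with_prefix search_with_prefix search_with_prefix_alt
  dsimp only
  rw [kLenSubs_eq]
  have hA : ∀ (G : List String) (l : List String),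
      G.foldl (fun r k_len_sub =>
        (r.1 ++ l.filter (fun x => PySem.Str.startswith x k_len_sub),
         r.2 ++ l.filter (fun x => PySem.Str.isIn k_len_sub x))) ([], [])
      = (G.flatMap (fun g => l.filter (fun x => PySem.Str.startswith x g)),
         G.flatMap (fun g => l.filter (fun x => PySem.Str.isIn g x))) := by
    intro G l
    rw [PySem.List.foldl_prod_mk
        (f := fun r g => r ++ l.filter (fun x => PySem.Str.startswith x g))
        (g := fun r g => r ++ l.filter (fun x => PySem.Str.isIn g x)),
      PySem.List.foldl_append_eq_flatMap, PySem.List.foldl_append_eq_flatMap, List.nil_append,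
      List.nil_append]
  have hBuild : ∀ l : List String,
      l.foldl (fun (d : PySem.Dict String (List String) × PySem.Dict String (List String)) x =>
          (d.1.modify (PySem.Str.slice x none (some 3)) [] (· ++ [x]),
           (gramsOf x).foldl (fun d2 g => d2.modify g [] (· ++ [x])) d.2))
        (PySem.Dict.empty, PySem.Dict.empty)
      = (l.foldl (fun d x => d.modify (PySem.Str.slice x none (some 3)) [] (· ++ [x]))
           PySem.Dict.empty,
         l.foldl (fun d x => (gramsOf x).foldl (fun d2 g => d2.modify g [] (· ++ [x])) d)
           PySem.Dict.empty) := by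
    intro l
    exact PySem.List.foldl_prod_mk
      (fun (d : PySem.Dict String (List String)) x =>
        d.modify (PySem.Str.slice x none (some 3)) [] (· ++ [x]))
      (fun (d : PySem.Dict String (List String)) x =>
        (gramsOf x).foldl (fun d2 g => d2.modify g [] (· ++ [x])) d) l _ _
  have hLook : ∀ (R : List Int) (d1 d2 : PySem.Dict String (List String)),
      R.foldl (fun r i =>
        (r.1 ++ d1.getD (PySem.Str.slice word (some i) (some (i + 3))) [],
         r.2 ++ d2.getD (PySem.Str.slice word (some i) (some (i + 3))) [])) ([], [])
      = (R.flatMap (fun i => d1.getD (PySem.Str.slice word (some i) (some (i + 3))) []),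
         R.flatMap (fun i => d2.getD (PySem.Str.slice word (some i) (some (i + 3))) [])) := by
    intro R d1 d2
    rw [PySem.List.foldl_prod_mk
        (f := fun r i => r ++ d1.getD (PySem.Str.slice word (some i) (some (i + 3))) [])
        (g := fun r i => r ++ d2.getD (PySem.Str.slice word (some i) (some (i + 3))) []),
      PySem.List.foldl_append_eq_flatMap, PySem.List.foldl_append_eq_flatMap, List.nil_append,
      List.nil_append]
  rw [hA, hBuild, hLook, List.flatMap_map, List.flatMap_map]
  refine Prod.ext ?_ ?_ <;> dsimp only
  · rw [List.flatMap_def, List.flatMap_def]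
    apply congrArg
    apply List.map_congr_left
    intro i hi
    rw [PySem.List.mem_pyRange_one] at hi
    exact (pref_getD _ _ (window_len word i hi.1 hi.2)).symm
  · rw [List.flatMap_def, List.flatMap_def]
    apply congrArg
    apply List.map_congr_left
    intro i hi
    rw [PySem.List.mem_pyRange_one] at hi
    exact (cont_getD _ _ (window_len word i hi.1 hi.2)).symm
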